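-- pv_equiv track=rewrite | github.com/Iwe-Coumou/Project-ML | funcs.py | split_clusters_by_layer
-- ===== SOURCE A (Python) =====
-- def split_clusters_by_layer(cluster_map, layer_mapping):
--     """
--     Groups a flat cluster_map by layer. Only meaningful after per_layer clustering,
--     where each cluster's neurons all belong to a single layer.
--
--     Args:
--         cluster_map:   {cluster_id: [global_neuron_indices]}
--         layer_mapping: [(layer_name, start_idx, end_idx), ...]
--
--     Returns:
--         {layer_name: {cluster_id: [global_neuron_indices]}}
--     """
--     result = {layer_name: {} for layer_name, _, _ in layer_mapping}
--
--     for cluster_id, neuron_indices in cluster_map.items():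
--         # In per_layer mode all neurons in a cluster share the same layer
--         global_idx = neuron_indices[0]
--         for layer_name, start, end in layer_mapping:
--             if start <= global_idx < end:
--                 result[layer_name][cluster_id] = neuron_indices
--                 break
--
--     return result
-- ===== SOURCE B (Python) =====
-- def split_clusters_by_layer(cluster_map, layer_mapping):
--     result = {}
--     remaining = dict(cluster_map)
--     for layer_name, start, end in layer_mapping:
--         assigned = {cid: ns for cid, ns in remaining.items() if start <= ns[0] < end}
--         for cid in assigned:
--             del remaining[cid]
--         result[layer_name] = assigned
--     return result
-- ===== Notes on version B (the rewrite author's own statement) =====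
-- stated objective: alternative
-- what changed: B inverts the traversal: instead of A's per-cluster inner scan of layers with break, B makes one pass per layer that claims the clusters falling in that layer's interval out of a shrinking pool of unassigned clusters; Pre_ excludes clusters with an empty neuron list (A raises IndexError) and inputs where a cluster's first index falls in the interval of a layer whose name is duplicated later, where A accidentally merges both same-named intervals' clusters into one dict entry while B's per-layer rebuild keeps the last pass.
import Mathlib
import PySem

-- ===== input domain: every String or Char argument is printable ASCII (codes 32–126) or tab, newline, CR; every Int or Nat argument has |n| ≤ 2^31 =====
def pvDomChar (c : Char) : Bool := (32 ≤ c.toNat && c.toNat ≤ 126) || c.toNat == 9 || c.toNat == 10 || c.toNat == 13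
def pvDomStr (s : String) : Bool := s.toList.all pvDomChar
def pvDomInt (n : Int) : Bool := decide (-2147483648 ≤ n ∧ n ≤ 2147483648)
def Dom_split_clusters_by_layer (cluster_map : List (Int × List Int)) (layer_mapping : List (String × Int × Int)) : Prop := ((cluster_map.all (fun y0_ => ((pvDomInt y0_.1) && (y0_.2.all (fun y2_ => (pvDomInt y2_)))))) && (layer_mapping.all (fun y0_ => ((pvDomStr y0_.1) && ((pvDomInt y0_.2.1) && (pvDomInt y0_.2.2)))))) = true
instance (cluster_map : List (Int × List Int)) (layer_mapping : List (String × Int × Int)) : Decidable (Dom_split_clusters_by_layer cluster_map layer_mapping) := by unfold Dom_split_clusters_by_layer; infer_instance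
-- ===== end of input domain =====

-- B groups by iterating LAYERS, each pass claiming its clusters out of a shrinking pool of
-- unassigned clusters, instead of A's per-cluster first-match scan over layers with break.


-- ===== PORT A =====
def split_clusters_by_layer (cluster_map : List (Int × List Int)) (layer_mapping : List (String × Int × Int)) : List (String × List (Int × List Int)) :=
  -- result = {layer_name: {} for layer_name, _, _ in layer_mapping}
  let result : PySem.Dict String (PySem.Dict Int (List Int)) :=
    layer_mapping.foldl (fun r t => r.insert t.1 PySem.Dict.empty) PySem.Dict.empty
  -- for cluster_id, neuron_indices in cluster_map.items(): inner layer scan with break = find?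
  let result := cluster_map.foldl (fun r c =>
    match PySem.List.pyGet? c.2 0 with
    | none => r  -- IndexError (empty neuron list): excluded by Pre_
    | some gidx =>
      match layer_mapping.find? (fun t => decide (t.2.1 ≤ gidx ∧ gidx < t.2.2)) with
      | none => r
      | some t => r.modify t.1 PySem.Dict.empty (fun d => d.insert c.1 c.2)) result
  result.items.map (fun p => (p.1, p.2.items))

-- ===== PORT B =====
def split_clusters_by_layer_alt (cluster_map : List (Int × List Int)) (layer_mapping : List (String × Int × Int)) : List (String × List (Int × List Int)) :=
  let fin := layer_mapping.foldl
    (fun (acc : PySem.Dict String (PySem.Dict Int (List Int)) × List (Int × List Int)) t =>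
      -- assigned = {cid: ns for cid, ns in remaining.items() if start <= ns[0] < end}
      let assigned : PySem.Dict Int (List Int) :=
        acc.2.foldl (fun d c =>
          if (match PySem.List.pyGet? c.2 0 with
              | none => false  -- IndexError (empty neuron list): excluded by Pre_
              | some g => decide (t.2.1 ≤ g ∧ g < t.2.2))
          then d.insert c.1 c.2 else d) PySem.Dict.empty
      -- for cid in assigned: del remaining[cid]  -- deleting the assigned keys keeps the other
      -- entries in order, i.e. it is exactly this filter (remaining's keys are distinct dict keys)
      let remaining := acc.2.filter (fun c => !assigned.contains c.1)
      (acc.1.insert t.1 assigned, remaining))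
    ((PySem.Dict.empty : PySem.Dict String (PySem.Dict Int (List Int))), cluster_map)
  fin.1.items.map (fun p => (p.1, p.2.items))

-- helper for the precondition: "cluster c's first neuron index lies in layer t's interval"
def pvHits (t : String × Int × Int) (c : Int × List Int) : Bool :=
  match c.2.head? with
  | none => false
  | some g => decide (t.2.1 ≤ g ∧ g < t.2.2)

-- "no cluster's first index falls in the interval of a layer whose name reappears later"
def pvPcond (cm : List (Int × List Int)) (lm : List (String × Int × Int)) : Prop :=
  List.Pairwise (fun t t' => t.1 = t'.1 → ∀ c ∈ cm, pvHits t c = false) lm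

-- ===== PRECONDITION & SPEC =====
-- Pre_ excludes (i) clusters with an empty neuron list, on which A raises IndexError; (ii) inputs
-- with duplicate cluster ids, which cannot arise since cluster_map models a Python dict; and
-- (iii) inputs where some cluster's first index falls in the interval of a layer whose name is
-- duplicated later in layer_mapping — there A's pre-initialized dict accidentally merges both
-- same-named intervals' clusters into one entry, while B's per-layer passes keep the last one
-- (see claim cites).
def Pre_split_clusters_by_layer (cluster_map : List (Int × List Int)) (layer_mapping : List (String × Int × Int)) : Prop :=
  (cluster_map.map (·.1)).Nodup ∧ (∀ c ∈ cluster_map, c.2 ≠ []) ∧ pvPcond cluster_map layer_mapping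
instance (cluster_map : List (Int × List Int)) (layer_mapping : List (String × Int × Int)) : Decidable (Pre_split_clusters_by_layer cluster_map layer_mapping) := by unfold Pre_split_clusters_by_layer pvPcond; infer_instance

def pvWitness_split_clusters_by_layer : (List (Int × List Int)) × (List (String × Int × Int)) :=
  ([(0, [1]), (1, [5])], [("a", 0, 4), ("b", 4, 8)])

def Spec_split_clusters_by_layer (cluster_map : List (Int × List Int)) (layer_mapping : List (String × Int × Int)) (out : List (String × List (Int × List Int))) : Prop := out = split_clusters_by_layer_alt cluster_map layer_mapping
instance (cluster_map : List (Int × List Int)) (layer_mapping : List (String × Int × Int)) (out : List (String × List (Int × List Int))) : Decidable (Spec_split_clusters_by_layer cluster_map layer_mapping out) := by unfold Spec_split_clusters_by_layer; infer_instance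

-- ===== CLAIM (what is proved, stated in full; the proofs are below) =====
def Claim_equal_split_clusters_by_layer : Prop := ∀ (cluster_map : List (Int × List Int)) (layer_mapping : List (String × Int × Int)), Dom_split_clusters_by_layer cluster_map layer_mapping → Pre_split_clusters_by_layer cluster_map layer_mapping → Spec_split_clusters_by_layer cluster_map layer_mapping (split_clusters_by_layer cluster_map layer_mapping)

-- ===== LEMMAS AND PROOFS =====

-- "cluster c's first neuron lies in layer t's interval" (via the list indexing A/B use)
def pvIn (t : String × Int × Int) (c : Int × List Int) : Bool :=
  match PySem.List.pyGet? c.2 0 with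
  | none => false
  | some g => decide (t.2.1 ≤ g ∧ g < t.2.2)

-- "A assigns cluster c to the layer named `name`" (first matching interval in lm)
def pvHit (lm : List (String × Int × Int)) (name : String) (c : Int × List Int) : Bool :=
  match PySem.List.pyGet? c.2 0 with
  | none => false
  | some g =>
    match lm.find? (fun t => decide (t.2.1 ≤ g ∧ g < t.2.2)) with
    | none => false
    | some t => t.1 == name

-- the per-name bucket both programs compute
def pvBucket (l : List (Int × List Int)) (lm : List (String × Int × Int)) (name : String) : PySem.Dict Int (List Int) :=
  l.foldl (fun d c => if pvHit lm name c then d.insert c.1 c.2 else d) PySem.Dict.empty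

-- common normal form of both outputs: first-occurrence-deduplicated names, each with its bucket
def pvSpec (cm : List (Int × List Int)) (lm : List (String × Int × Int)) : List (String × List (Int × List Int)) :=
  (PySem.Set.ofList (lm.map (·.1))).map (fun k => (k, cm.filter (pvHit lm k)))

theorem pvIn_eq_hits (t : String × Int × Int) (c : Int × List Int) : pvIn t c = pvHits t c := by
  unfold pvIn pvHits
  cases c.2 with
  | nil => simp [PySem.List.pyGet?, PySem.List.pyIdx?]
  | cons x xs => simp [PySem.List.pyGet?, PySem.List.pyIdx?]

theorem pvHit_none (lm : List (String × Int × Int)) (name : String) (c : Int × List Int)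
    (hg : PySem.List.pyGet? c.2 0 = none) : pvHit lm name c = false := by
  unfold pvHit; rw [hg]

theorem pvHit_some_none (lm : List (String × Int × Int)) (name : String) (c : Int × List Int)
    (g : Int) (hg : PySem.List.pyGet? c.2 0 = some g)
    (hf : lm.find? (fun t => decide (t.2.1 ≤ g ∧ g < t.2.2)) = none) :
    pvHit lm name c = false := by
  unfold pvHit; rw [hg]; simp only []; rw [hf]

theorem pvHit_some_some (lm : List (String × Int × Int)) (name : String) (c : Int × List Int)
    (g : Int) (t : String × Int × Int) (hg : PySem.List.pyGet? c.2 0 = some g)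
    (hf : lm.find? (fun t => decide (t.2.1 ≤ g ∧ g < t.2.2)) = some t) :
    pvHit lm name c = (t.1 == name) := by
  unfold pvHit; rw [hg]; simp only []; rw [hf]

-- ----- generic: a fold of conditional inserts over distinct keys builds exactly the filtered list -----
theorem pvDictFilter_items (p : Int × List Int → Bool) (l : List (Int × List Int))
    (h : (l.map (·.1)).Nodup) :
    (l.foldl (fun d c => if p c then d.insert c.1 c.2 else d)
        (PySem.Dict.empty : PySem.Dict Int (List Int))).items = l.filter p := by
  rw [PySem.List.foldl_if_eq_foldl_filter]
  rw [PySem.Dict.items_foldl_insert_fresh (l.filter p) Prod.fst Prod.snd PySem.Dict.empty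
      (fun a _ => PySem.Dict.contains_empty a.1)
      (h.sublist (List.filter_sublist.map (fun x : Int × List Int => x.1)))]
  simp [show (PySem.Dict.empty : PySem.Dict Int (List Int)).items = [] from rfl]

theorem pvDictFilter_contains (p : Int × List Int → Bool) (l : List (Int × List Int))
    (h : (l.map (·.1)).Nodup) (c : Int × List Int) (hc : c ∈ l) :
    (l.foldl (fun d c => if p c then d.insert c.1 c.2 else d)
        (PySem.Dict.empty : PySem.Dict Int (List Int))).contains c.1 = p c := by
  rw [PySem.Dict.contains_eq_decide_mem_keys]
  have hkeys : (l.foldl (fun d c => if p c then d.insert c.1 c.2 else d)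
      (PySem.Dict.empty : PySem.Dict Int (List Int))).keys = (l.filter p).map (·.1) := by
    have := pvDictFilter_items p l h
    simp only [PySem.Dict.keys, this]
  rw [hkeys]
  by_cases hp : p c = true
  · simp only [hp, decide_eq_true_eq]
    exact List.mem_map.mpr ⟨c, List.mem_filter.mpr ⟨hc, hp⟩, rfl⟩
  · simp only [hp]
    simp only [decide_eq_false_iff_not]
    intro hmem
    obtain ⟨c', hc', he⟩ := List.mem_map.mp hmem
    have hc'l := (List.mem_filter.mp hc').1
    have : c' = c := List.inj_on_of_nodup_map h hc'l hc he
    subst this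
    exact (Bool.eq_false_iff.mp (by simpa using hp)) (List.mem_filter.mp hc').2

-- ----- pvHit decomposes along the layer list -----
theorem pvHit_cons_self (t : String × Int × Int) (rest : List (String × Int × Int))
    (h : t.1 ∉ rest.map (·.1)) (c : Int × List Int) :
    pvHit (t :: rest) t.1 c = pvIn t c := by
  unfold pvHit pvIn
  cases hg : PySem.List.pyGet? c.2 0 with
  | none => rfl
  | some g =>
    simp only []
    by_cases hp : t.2.1 ≤ g ∧ g < t.2.2
    · rw [List.find?_cons_of_pos (by simpa using hp)]
      simp [hp]
    · rw [List.find?_cons_of_neg (by simpa using hp)]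
      cases hf : rest.find? (fun t' => decide (t'.2.1 ≤ g ∧ g < t'.2.2)) with
      | none => simp [hp]
      | some t' =>
        have ht' : t' ∈ rest := List.mem_of_find?_eq_some hf
        have hne : t'.1 ≠ t.1 := fun he => h (he ▸ List.mem_map.mpr ⟨t', ht', rfl⟩)
        simp [hp, hne]

theorem pvHit_cons_ne (t : String × Int × Int) (rest : List (String × Int × Int))
    (name : String) (h : name ≠ t.1) (c : Int × List Int) :
    pvHit (t :: rest) name c = (!pvIn t c && pvHit rest name c) := by
  unfold pvHit pvIn
  cases hg : PySem.List.pyGet? c.2 0 with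
  | none => rfl
  | some g =>
    simp only []
    by_cases hp : t.2.1 ≤ g ∧ g < t.2.2
    · rw [List.find?_cons_of_pos (by simpa using hp)]
      simp [hp, Ne.symm h]
    · rw [List.find?_cons_of_neg (by simpa using hp)]
      simp [hp]

theorem pvHit_cons_skip (t : String × Int × Int) (rest : List (String × Int × Int))
    (name : String) (c : Int × List Int) (hin : pvIn t c = false) :
    pvHit (t :: rest) name c = pvHit rest name c := by
  unfold pvHit
  unfold pvIn at hin
  cases hg : PySem.List.pyGet? c.2 0 with
  | none => rfl
  | some g =>
    rw [hg] at hin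
    simp only [] at hin ⊢
    rw [List.find?_cons_of_neg (by simp [hin])]

-- ----- A side -----
def pvStepA (lm : List (String × Int × Int))
    (r : PySem.Dict String (PySem.Dict Int (List Int))) (c : Int × List Int) :
    PySem.Dict String (PySem.Dict Int (List Int)) :=
  match PySem.List.pyGet? c.2 0 with
  | none => r
  | some gidx =>
    match lm.find? (fun t => decide (t.2.1 ≤ gidx ∧ gidx < t.2.2)) with
    | none => r
    | some t => r.modify t.1 PySem.Dict.empty (fun d => d.insert c.1 c.2)

theorem pvA_keys (lm : List (String × Int × Int)) :
    ∀ (cm : List (Int × List Int)) (r : PySem.Dict String (PySem.Dict Int (List Int))),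
    r.keys = PySem.Set.ofList (lm.map (·.1)) →
    (cm.foldl (pvStepA lm) r).keys = PySem.Set.ofList (lm.map (·.1)) := by
  intro cm
  induction cm with
  | nil => intro r h; exact h
  | cons c cm ih =>
    intro r h
    simp only [List.foldl_cons]
    apply ih
    unfold pvStepA
    cases hg : PySem.List.pyGet? c.2 0 with
    | none => exact h
    | some g =>
      simp only []
      cases hf : lm.find? (fun t => decide (t.2.1 ≤ g ∧ g < t.2.2)) with
      | none => exact h
      | some t =>
        simp only []
        have hmem : t.1 ∈ r.keys := by
          rw [h]
          exact (PySem.Set.mem_ofList _ _).mpr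
            (List.mem_map.mpr ⟨t, List.mem_of_find?_eq_some hf, rfl⟩)
        have hcont : r.contains t.1 = true := (PySem.Dict.contains_iff_mem_keys _ _).mpr hmem
        rw [PySem.Dict.keys_modify, PySem.Dict.keys_insert_of_contains _ _ hcont]
        exact h

theorem pvA_getD (lm : List (String × Int × Int)) (name : String) :
    ∀ (cm : List (Int × List Int)) (r : PySem.Dict String (PySem.Dict Int (List Int))),
    (cm.foldl (pvStepA lm) r).getD name PySem.Dict.empty
      = cm.foldl (fun d c => if pvHit lm name c then d.insert c.1 c.2 else d)
          (r.getD name PySem.Dict.empty) := by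
  intro cm
  induction cm with
  | nil => intro r; rfl
  | cons c cm ih =>
    intro r
    simp only [List.foldl_cons, ih]
    congr 1
    unfold pvStepA
    cases hg : PySem.List.pyGet? c.2 0 with
    | none => rw [pvHit_none lm name c hg]; simp
    | some g =>
      simp only []
      cases hf : lm.find? (fun t => decide (t.2.1 ≤ g ∧ g < t.2.2)) with
      | none => rw [pvHit_some_none lm name c g hg hf]; simp
      | some t =>
        simp only []
        rw [pvHit_some_some lm name c g t hg hf, PySem.Dict.getD_modify]
        by_cases h : name = t.1
        · simp [h]
        · simp [h, Ne.symm h]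

theorem pvA_init_getD (name : String) :
    ∀ (lm : List (String × Int × Int)) (r : PySem.Dict String (PySem.Dict Int (List Int))),
    r.getD name PySem.Dict.empty = PySem.Dict.empty →
    (lm.foldl (fun r t => r.insert t.1 PySem.Dict.empty) r).getD name PySem.Dict.empty
      = PySem.Dict.empty := by
  intro lm
  induction lm with
  | nil => intro r h; exact h
  | cons t lm ih =>
    intro r h
    simp only [List.foldl_cons]
    apply ih
    rw [PySem.Dict.getD_insert]
    by_cases he : name = t.1 <;> simp [he, h]

theorem pvA_eq_spec (cm : List (Int × List Int)) (lm : List (String × Int × Int))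
    (hcid : (cm.map (·.1)).Nodup) :
    split_clusters_by_layer cm lm = pvSpec cm lm := by
  show (cm.foldl (pvStepA lm)
      (lm.foldl (fun r t => r.insert t.1 PySem.Dict.empty) PySem.Dict.empty)).items.map
        (fun p => (p.1, p.2.items)) = pvSpec cm lm
  set init : PySem.Dict String (PySem.Dict Int (List Int)) :=
    lm.foldl (fun r t => r.insert t.1 PySem.Dict.empty) PySem.Dict.empty with hinit
  have hkinit : init.keys = PySem.Set.ofList (lm.map (·.1)) := by
    rw [hinit, PySem.Dict.keys_foldl_insert_key lm (·.1) (fun _ _ => PySem.Dict.empty)]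
    rw [PySem.Dict.keys_empty]
    rfl
  have hkeys : (cm.foldl (pvStepA lm) init).keys = PySem.Set.ofList (lm.map (·.1)) :=
    pvA_keys lm cm init hkinit
  have hnd : (cm.foldl (pvStepA lm) init).keys.Nodup := by
    rw [hkeys]; exact PySem.Set.nodup_ofList _
  rw [PySem.Dict.items_eq_map_keys _ hnd PySem.Dict.empty, hkeys]
  unfold pvSpec
  rw [List.map_map]
  apply List.map_congr_left
  intro k _
  simp only [Function.comp]
  congr 1
  rw [pvA_getD lm k cm init, pvA_init_getD k lm PySem.Dict.empty (PySem.Dict.getD_empty _ _)]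
  exact pvDictFilter_items (pvHit lm k) cm hcid

-- ----- B side -----
def pvStepB (acc : PySem.Dict String (PySem.Dict Int (List Int)) × List (Int × List Int))
    (t : String × Int × Int) :
    PySem.Dict String (PySem.Dict Int (List Int)) × List (Int × List Int) :=
  let assigned : PySem.Dict Int (List Int) :=
    acc.2.foldl (fun d c => if pvIn t c then d.insert c.1 c.2 else d) PySem.Dict.empty
  (acc.1.insert t.1 assigned, acc.2.filter (fun c => !assigned.contains c.1))

theorem pvStepB_eq (res : PySem.Dict String (PySem.Dict Int (List Int)))
    (rem : List (Int × List Int)) (t : String × Int × Int)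
    (h : (rem.map (·.1)).Nodup) :
    pvStepB (res, rem) t
      = (res.insert t.1
          (rem.foldl (fun d c => if pvIn t c then d.insert c.1 c.2 else d) PySem.Dict.empty),
         rem.filter (fun c => !pvIn t c)) := by
  unfold pvStepB
  simp only []
  congr 1
  apply List.filter_congr
  intro c hc
  rw [pvDictFilter_contains (pvIn t) rem h c hc]

theorem pvKeys_insert_add (d : PySem.Dict String (PySem.Dict Int (List Int))) (k : String)
    (v : PySem.Dict Int (List Int)) : (d.insert k v).keys = PySem.Set.add d.keys k := by
  by_cases h : d.contains k = true
  · rw [PySem.Dict.keys_insert_of_contains _ _ h]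
    have hm : k ∈ d.keys := (PySem.Dict.contains_iff_mem_keys _ _).mp h
    simp [PySem.Set.add, PySem.Set.contains, hm]
  · rw [PySem.Dict.keys_insert_of_not_contains _ _ (by simpa using h)]
    have hm : k ∉ d.keys := fun hm => h ((PySem.Dict.contains_iff_mem_keys _ _).mpr hm)
    simp [PySem.Set.add, PySem.Set.contains, hm]

theorem pvB_keys :
    ∀ (lm : List (String × Int × Int)) (res : PySem.Dict String (PySem.Dict Int (List Int)))
      (rem : List (Int × List Int)), (rem.map (·.1)).Nodup →
    (lm.foldl pvStepB (res, rem)).1.keys = PySem.Set.update res.keys (lm.map (·.1)) := by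
  intro lm
  induction lm with
  | nil => intro res rem _; rfl
  | cons t rest ih =>
    intro res rem h
    simp only [List.foldl_cons]
    rw [pvStepB_eq res rem t h]
    rw [ih _ _ (h.sublist (List.filter_sublist.map (fun x : Int × List Int => x.1)))]
    rw [pvKeys_insert_add]
    rfl

-- the loop invariant of B: after processing lm on pool rem, the entry of `name` is its bucket
theorem pvB_getD :
    ∀ (lm : List (String × Int × Int)) (res : PySem.Dict String (PySem.Dict Int (List Int)))
      (rem : List (Int × List Int)), (rem.map (·.1)).Nodup → pvPcond rem lm →
    ∀ name, (lm.foldl pvStepB (res, rem)).1.getD name PySem.Dict.empty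
      = if name ∈ lm.map (·.1) then pvBucket rem lm name
        else res.getD name PySem.Dict.empty := by
  intro lm
  induction lm with
  | nil => intro res rem _ _ name; simp
  | cons t rest ih =>
    intro res rem hnodup hP name
    have hP' : pvPcond (rem.filter (fun c => !pvIn t c)) rest :=
      ((List.pairwise_cons.mp hP).2).imp
        (fun h hname c hc => h hname c (List.mem_of_mem_filter hc))
    have hnodup' : ((rem.filter (fun c => !pvIn t c)).map (·.1)).Nodup :=
      hnodup.sublist (List.filter_sublist.map (fun x : Int × List Int => x.1))
    simp only [List.foldl_cons]
    rw [pvStepB_eq res rem t hnodup]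
    rw [ih _ _ hnodup' hP' name]
    by_cases hmem : name ∈ rest.map (·.1)
    · rw [if_pos hmem, if_pos (by simp [hmem])]
      by_cases hne : name = t.1
      · subst hne
        have hall : ∀ c ∈ rem, pvIn t c = false := by
          intro c hc
          obtain ⟨t', ht', hname⟩ := List.mem_map.mp hmem
          rw [pvIn_eq_hits]
          exact (List.pairwise_cons.mp hP).1 t' ht' hname.symm c hc
        have hfilt : rem.filter (fun c => !pvIn t c) = rem :=
          List.filter_eq_self.mpr (fun c hc => by rw [hall c hc]; rfl)
        rw [hfilt]
        unfold pvBucket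
        exact PySem.List.foldl_congr_mem' rem _ _ _
          (fun c hc acc => by rw [pvHit_cons_skip t rest t.1 c (hall c hc)])
      · unfold pvBucket
        rw [PySem.List.foldl_if_eq_foldl_filter, PySem.List.foldl_if_eq_foldl_filter,
          List.filter_filter]
        congr 1
        apply List.filter_congr
        intro c _
        rw [pvHit_cons_ne t rest name hne c, Bool.and_comm]
    · rw [if_neg hmem, PySem.Dict.getD_insert]
      by_cases hne : name = t.1
      · subst hne
        rw [if_pos rfl, if_pos (by simp)]
        unfold pvBucket
        exact PySem.List.foldl_congr_mem' rem _ _ _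
          (fun c _ acc => by rw [pvHit_cons_self t rest hmem c])
      · rw [if_neg hne, if_neg (by simp [hmem, hne])]

theorem pvB_eq_spec (cm : List (Int × List Int)) (lm : List (String × Int × Int))
    (hcid : (cm.map (·.1)).Nodup) (hP : pvPcond cm lm) :
    split_clusters_by_layer_alt cm lm = pvSpec cm lm := by
  show (lm.foldl pvStepB (PySem.Dict.empty, cm)).1.items.map (fun p => (p.1, p.2.items))
      = pvSpec cm lm
  have hkeys : (lm.foldl pvStepB (PySem.Dict.empty, cm)).1.keys
      = PySem.Set.ofList (lm.map (·.1)) := by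
    rw [pvB_keys lm PySem.Dict.empty cm hcid, PySem.Dict.keys_empty]
    rfl
  have hnd : (lm.foldl pvStepB (PySem.Dict.empty, cm)).1.keys.Nodup := by
    rw [hkeys]; exact PySem.Set.nodup_ofList _
  rw [PySem.Dict.items_eq_map_keys _ hnd PySem.Dict.empty, hkeys]
  unfold pvSpec
  rw [List.map_map]
  apply List.map_congr_left
  intro k hk
  simp only [Function.comp]
  congr 1
  rw [pvB_getD lm PySem.Dict.empty cm hcid hP k,
    if_pos ((PySem.Set.mem_ofList _ _).mp hk)]
  exact pvDictFilter_items (pvHit lm k) cm hcid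

-- ===== VERDICT (by name: the statement is the Claim_ definition above) =====
theorem split_clusters_by_layer_spec : Claim_equal_split_clusters_by_layer := by
  intro cm lm _ hpre
  show split_clusters_by_layer cm lm = split_clusters_by_layer_alt cm lm
  rw [pvA_eq_spec cm lm hpre.1, pvB_eq_spec cm lm hpre.1 hpre.2.2]
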